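-- pv_equiv track=rewrite | github.com/EuroPython/programapi | src/transform.py | replace_duplicate_slugs
-- ===== SOURCE A (Python) =====
-- def replace_duplicate_slugs(code_to_slug: dict[str, str]) -> dict[str, str]:
--     slug_count: dict[str, int] = {}
--     seen_slugs: set[str] = set()
--
--     for code, slug in code_to_slug.items():
--         original_slug = slug
--
--         if original_slug in seen_slugs:
--             if original_slug in slug_count:
--                 slug_count[original_slug] += 1
--             else:
--                 slug_count[original_slug] = 1
--             code_to_slug[code] = f"{original_slug}-{slug_count[original_slug]}"
--         else:
--             seen_slugs.add(original_slug)
--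
--     return code_to_slug
-- ===== SOURCE B (Python) =====
-- def replace_duplicate_slugs(code_to_slug: dict[str, str]) -> dict[str, str]:
--     remaining: dict[str, int] = {}
--     for slug in code_to_slug.values():
--         remaining[slug] = remaining.get(slug, 0) + 1
--     for code, slug in reversed(list(code_to_slug.items())):
--         remaining[slug] -= 1
--         if remaining[slug] > 0:
--             code_to_slug[code] = f"{slug}-{remaining[slug]}"
--     return code_to_slug
-- ===== Notes on version B (the rewrite author's own statement) =====
-- stated objective: alternative
-- what changed: Replaces A's single forward pass with lazily maintained seen-set + duplicate-counter by a two-stage algorithm: a first pass totals every slug into one counter, then a second pass walks the items BACKWARDS, decrementing the counter so that the decremented value is exactly the number of earlier occurrences, renaming when it is positive.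
import Mathlib
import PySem

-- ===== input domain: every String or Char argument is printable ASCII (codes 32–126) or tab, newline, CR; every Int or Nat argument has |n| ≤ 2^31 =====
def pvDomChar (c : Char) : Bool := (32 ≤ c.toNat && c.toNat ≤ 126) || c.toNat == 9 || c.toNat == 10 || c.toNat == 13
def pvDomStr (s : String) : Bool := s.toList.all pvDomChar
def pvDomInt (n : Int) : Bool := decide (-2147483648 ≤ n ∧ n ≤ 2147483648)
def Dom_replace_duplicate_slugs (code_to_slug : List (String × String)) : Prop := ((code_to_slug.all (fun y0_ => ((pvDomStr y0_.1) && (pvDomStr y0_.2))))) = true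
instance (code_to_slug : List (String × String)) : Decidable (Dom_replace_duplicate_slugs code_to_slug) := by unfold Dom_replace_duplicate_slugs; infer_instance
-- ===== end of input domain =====

-- B replaces A's forward seen-set + duplicate-counter pass by two staged passes: count every
-- slug first, then walk the items BACKWARDS decrementing the counter (objective: alternative).
-- A mutates its argument dict in place and returns it; B performs the same in-place mutation.


-- ===== PORT A =====
-- one loop iteration of A: state = (slug_count, seen_slugs, the mutated dict)
def rdsStepA (st : PySem.Dict String Int × PySem.Set String × PySem.Dict String String)
    (p : String × String) :
    PySem.Dict String Int × PySem.Set String × PySem.Dict String String :=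
  let slug_count := st.1
  let seen_slugs := st.2.1
  let d := st.2.2
  let original_slug := p.2
  if PySem.Set.contains seen_slugs original_slug then
    let slug_count' :=
      match slug_count.get? original_slug with
      | some v => slug_count.insert original_slug (v + 1)
      | none => slug_count.insert original_slug 1
    (slug_count', seen_slugs,
      d.insert p.1 (original_slug ++ "-" ++ PySem.Int.toStr (slug_count'.getD original_slug 0)))
  else
    (slug_count, PySem.Set.add seen_slugs original_slug, d)

def replace_duplicate_slugs (code_to_slug : List (String × String)) : List (String × String) :=
  let d := PySem.Dict.ofList code_to_slug
  (d.items.foldl rdsStepA (PySem.Dict.empty, PySem.Set.empty, d)).2.2.items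

-- ===== PORT B =====
-- one iteration of B's second (reversed) loop: state = (remaining, the mutated dict).
-- `remaining[slug] -= 1`: the key is always present here (written by the counting pass),
-- so `getD _ 0` reads exactly the value Python reads
def rdsStepB (st : PySem.Dict String Int × PySem.Dict String String) (p : String × String) :
    PySem.Dict String Int × PySem.Dict String String :=
  let rem := st.1.insert p.2 (st.1.getD p.2 0 - 1)
  if rem.getD p.2 0 > 0 then
    (rem, st.2.insert p.1 (p.2 ++ "-" ++ PySem.Int.toStr (rem.getD p.2 0)))
  else
    (rem, st.2)

def replace_duplicate_slugs_alt (code_to_slug : List (String × String)) : List (String × String) :=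
  let d := PySem.Dict.ofList code_to_slug
  let remaining := d.items.foldl (fun r p => r.insert p.2 (r.getD p.2 0 + 1)) PySem.Dict.empty
  (d.items.reverse.foldl rdsStepB (remaining, d)).2.items

-- ===== PRECONDITION & SPEC =====
def Spec_replace_duplicate_slugs (code_to_slug : List (String × String)) (out : List (String × String)) : Prop := out = replace_duplicate_slugs_alt code_to_slug
instance (code_to_slug : List (String × String)) (out : List (String × String)) : Decidable (Spec_replace_duplicate_slugs code_to_slug out) := by unfold Spec_replace_duplicate_slugs; infer_instance

-- ===== CLAIM (what is proved, stated in full; the proofs are below) =====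
def Claim_equal_replace_duplicate_slugs : Prop := ∀ (code_to_slug : List (String × String)), Dom_replace_duplicate_slugs code_to_slug → Spec_replace_duplicate_slugs code_to_slug (replace_duplicate_slugs code_to_slug)

-- ===== LEMMAS AND PROOFS =====

-- the common normal form both loops produce: the pair whose slug has k earlier
-- occurrences (k ≥ 1) becomes slug-k, first occurrences stay
def rdsRename (s : String) (k : Nat) : String :=
  if k = 0 then s else s ++ "-" ++ PySem.Int.toStr (k : Int)

def rdsF : List String → List (String × String) → List (String × String)
  | _, [] => []
  | pre, (c, s) :: t => (c, rdsRename s (pre.count s)) :: rdsF (pre ++ [s]) t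

theorem rdsF_map_fst (pre : List String) (l : List (String × String)) :
    (rdsF pre l).map (·.1) = l.map (·.1) := by
  induction l generalizing pre with
  | nil => rfl
  | cons p t ih => obtain ⟨c, s⟩ := p; simp [rdsF, ih]

theorem rdsReplace (pre post : List (String × String)) (c s v : String)
    (hpre : c ∉ pre.map (·.1)) (hpost : c ∉ post.map (·.1)) :
    (pre ++ (c, s) :: post).map (fun p => if p.1 == c then (c, v) else p)
      = pre ++ (c, v) :: post := by
  induction pre with
  | nil =>
    simp only [List.map, List.nil_append, beq_self_eq_true, if_pos]
    congr 1
    conv_rhs => rw [← List.map_id post]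
    refine List.map_congr_left ?_
    intro p hp
    have : p.1 ≠ c := fun h => hpost (h ▸ List.mem_map_of_mem hp)
    simp [this]
  | cons q t ih =>
    have hq : q.1 ≠ c := by
      simp only [List.map_cons] at hpre
      intro h; exact hpre (by simp [h])
    simp only [List.cons_append, List.map_cons]
    rw [if_neg (by simpa using hq)]
    have : c ∉ t.map (·.1) := by
      intro h; exact hpre (by simp only [List.map_cons]; exact List.mem_cons_of_mem _ h)
    rw [ih this]


theorem rdsA_loop (rest : List (String × String)) (pre : List String)
    (proc : List (String × String)) (sc : PySem.Dict String Int) (seen : PySem.Set String)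
    (d : PySem.Dict String String)
    (hd : d.items = proc ++ rest)
    (hnd : ((proc ++ rest).map (·.1)).Nodup)
    (hseen : ∀ s, PySem.Set.contains seen s = decide (pre.count s ≠ 0))
    (hsc : ∀ s, sc.get? s = if 2 ≤ pre.count s then some ((pre.count s : Int) - 1) else none) :
    (rest.foldl rdsStepA (sc, seen, d)).2.2.items = proc ++ rdsF pre rest := by
  induction rest generalizing pre proc sc seen d with
  | nil => simpa [rdsF] using hd
  | cons p t ih =>
    obtain ⟨c, s⟩ := p
    simp only [List.foldl_cons]
    have hcpre : c ∉ proc.map (·.1) := by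
      intro h
      have h' := hnd
      rw [List.map_append] at h'
      exact (List.disjoint_of_nodup_append h') h (by simp)
    have hct : c ∉ t.map (·.1) := by
      have h' := hnd
      rw [List.map_append] at h'
      have h2 := h'.of_append_right
      simp only [List.map_cons, List.nodup_cons] at h2
      exact fun h => h2.1 (by simpa using h)
    by_cases hs : PySem.Set.contains seen s = true
    · -- duplicate: pre.count s ≥ 1
      have hm1 : pre.count s ≠ 0 := by
        have h' := hseen s; rw [hs] at h'; simpa using h'.symm
      have hsc' :
          (match sc.get? s with
            | some v => sc.insert s (v + 1)
            | none => sc.insert s 1) = sc.insert s ((pre.count s : Int)) := by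
        rcases Nat.lt_or_ge (pre.count s) 2 with h2 | h2
        · have hg : sc.get? s = none := by rw [hsc s, if_neg (by omega)]
          rw [hg]
          have h1 : pre.count s = 1 := by omega
          rw [h1]; norm_num
        · have hg : sc.get? s = some ((pre.count s : Int) - 1) := by rw [hsc s, if_pos h2]
          rw [hg]; norm_num
      have hstep : rdsStepA (sc, seen, d) (c, s)
          = (sc.insert s ((pre.count s : Int)), seen,
             d.insert c (s ++ "-" ++ PySem.Int.toStr ((pre.count s : Int)))) := by
        simp only [rdsStepA, hs, if_pos]
        rw [hsc']
        simp [PySem.Dict.getD_insert_self]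
      rw [hstep]
      have hcont : d.contains c = true := by
        have hmem : c ∈ d.keys := by
          simp only [PySem.Dict.keys, hd, List.map_append, List.map_cons]
          simp
        simpa [PySem.Dict.contains_iff_mem_keys] using hmem
      have hitems : (d.insert c (s ++ "-" ++ PySem.Int.toStr ((pre.count s : Int)))).items
          = proc ++ (c, rdsRename s (pre.count s)) :: t := by
        rw [PySem.Dict.items_insert_of_contains d _ hcont, hd,
          rdsReplace _ _ _ s _ hcpre hct]
        simp [rdsRename, hm1]
      rw [show rdsF pre ((c, s) :: t)
          = (c, rdsRename s (pre.count s)) :: rdsF (pre ++ [s]) t from rfl]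
      have hrec := ih (pre ++ [s]) (proc ++ [(c, rdsRename s (pre.count s))])
        (sc.insert s ((pre.count s : Int))) seen _
        (by simpa using hitems)
        (by
          have he : ((proc ++ [(c, rdsRename s (pre.count s))]) ++ t).map (·.1)
              = (proc ++ (c, s) :: t).map (·.1) := by simp
          rw [he]; exact hnd)
        (by
          intro s'
          rw [hseen s']
          by_cases he : s' = s
          · subst he
            simp [List.count_append, hm1]
          · simp [List.count_append, Ne.symm he])
        (by
          intro s'
          by_cases he : s' = s
          · subst he
            rw [PySem.Dict.get?_insert_self,
              if_pos (by
                have h1 : List.count s' [s'] = 1 := by simp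
                simp only [List.count_append, h1]; omega)]
            simp [List.count_append]
          · rw [PySem.Dict.get?_insert_of_ne _ _ he, hsc s']
            have hc' : (pre ++ [s]).count s' = pre.count s' := by
              simp [List.count_append, Ne.symm he]
            rw [hc'])
      simpa using hrec
    · -- first occurrence: pre.count s = 0
      have hm0 : pre.count s = 0 := by
        have h' := hseen s
        rw [Bool.not_eq_true] at hs
        rw [hs] at h'
        simpa using h'.symm
      have hsmem : s ∉ seen := by
        rw [Bool.not_eq_true] at hs
        simpa [PySem.Set.contains] using hs
      have hstep : rdsStepA (sc, seen, d) (c, s) = (sc, PySem.Set.add seen s, d) := by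
        simp [rdsStepA, hsmem]
      rw [hstep]
      have hadd : PySem.Set.add seen s = seen ++ [s] := by
        simp [PySem.Set.add, PySem.Set.contains, hsmem]
      rw [show rdsF pre ((c, s) :: t)
          = (c, rdsRename s (pre.count s)) :: rdsF (pre ++ [s]) t from rfl]
      have hren : rdsRename s (pre.count s) = s := by simp [rdsRename, hm0]
      rw [hren]
      have hrec := ih (pre ++ [s]) (proc ++ [(c, s)]) sc (PySem.Set.add seen s) d
        (by simpa using hd)
        (by simpa using hnd)
        (by
          intro s'
          rw [hadd]
          by_cases he : s' = s
          · subst he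
            simp [PySem.Set.contains, List.count_append]
          · have hc' : PySem.Set.contains (seen ++ [s]) s' = PySem.Set.contains seen s' := by
              simp [PySem.Set.contains, he]
            rw [hc', hseen s']
            simp [List.count_append, Ne.symm he])
        (by
          intro s'
          rw [hsc s']
          by_cases he : s' = s
          · subst he
            simp [List.count_append, hm0]
          · simp [List.count_append, Ne.symm he])
      simpa using hrec
theorem rdsB_loop (pre suf : List (String × String))
    (rem : PySem.Dict String Int) (d : PySem.Dict String String)
    (hrem : ∀ s, rem.getD s 0 = ((pre.map (·.2)).count s : Int))
    (hd : d.items = pre ++ rdsF (pre.map (·.2)) suf)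
    (hnd : ((pre ++ suf).map (·.1)).Nodup) :
    (pre.reverse.foldl rdsStepB (rem, d)).2.items = rdsF [] (pre ++ suf) := by
  induction pre using List.reverseRecOn generalizing suf rem d with
  | nil => simpa using hd
  | append_singleton pre' p ih =>
    obtain ⟨c, s⟩ := p
    rw [List.reverse_append, List.reverse_singleton, List.singleton_append, List.foldl_cons]
    have hslugs : ((pre' ++ [(c, s)]).map (·.2)) = pre'.map (·.2) ++ [s] := by simp
    have hcnt : List.count s ((pre' ++ [(c, s)]).map (·.2))
        = (pre'.map (·.2)).count s + 1 := by
      rw [hslugs, List.count_append]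
      simp
    -- the decremented counter value is the number of earlier occurrences
    have hstep : rdsStepB (rem, d) (c, s)
        = (rem.insert s (((pre'.map (·.2)).count s : Int)),
           if ((pre'.map (·.2)).count s : Int) > 0 then
             d.insert c (s ++ "-" ++ PySem.Int.toStr (((pre'.map (·.2)).count s : Int)))
           else d) := by
      have h1 : rem.getD s 0 - 1 = ((pre'.map (·.2)).count s : Int) := by
        rw [hrem s, hcnt]; push_cast; ring
      simp only [rdsStepB, h1, PySem.Dict.getD_insert_self]
      split_ifs <;> rfl
    rw [hstep]
    -- membership facts
    have hcpre : c ∉ pre'.map (·.1) := by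
      have h' := hnd
      rw [List.append_assoc, List.map_append] at h'
      exact fun h => (List.disjoint_of_nodup_append h') h (by simp)
    have hcsuf : c ∉ suf.map (·.1) := by
      have h' := hnd
      rw [List.append_assoc, List.map_append] at h'
      have h2 := h'.of_append_right
      simp only [List.singleton_append, List.map_cons, List.nodup_cons] at h2
      exact h2.1
    -- d.items in split form
    have hd' : d.items = pre' ++ (c, s) :: rdsF (pre'.map (·.2) ++ [s]) suf := by
      rw [hd, hslugs]
      simp
    -- new dict's items
    have hitems :
        (if ((pre'.map (·.2)).count s : Int) > 0 then
            d.insert c (s ++ "-" ++ PySem.Int.toStr (((pre'.map (·.2)).count s : Int)))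
          else d).items
        = pre' ++ rdsF (pre'.map (·.2)) ((c, s) :: suf) := by
      rw [show rdsF (pre'.map (·.2)) ((c, s) :: suf)
          = (c, rdsRename s ((pre'.map (·.2)).count s))
            :: rdsF (pre'.map (·.2) ++ [s]) suf from rfl]
      by_cases h0 : (pre'.map (·.2)).count s = 0
      · rw [if_neg (by omega)]
        rw [hd']
        simp [rdsRename, h0]
      · rw [if_pos (by omega)]
        have hcont : d.contains c = true := by
          have hmem : c ∈ d.keys := by
            simp only [PySem.Dict.keys, hd', List.map_append, List.map_cons]
            simp
          simpa [PySem.Dict.contains_iff_mem_keys] using hmem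
        rw [PySem.Dict.items_insert_of_contains d _ hcont, hd']
        have hpost : c ∉ (rdsF (pre'.map (·.2) ++ [s]) suf).map (·.1) := by
          rw [rdsF_map_fst]; exact hcsuf
        rw [rdsReplace _ _ _ s _ hcpre hpost]
        simp [rdsRename, h0]
    have hrec := ih ((c, s) :: suf) (rem.insert s (((pre'.map (·.2)).count s : Int)))
      _
      (by
        intro s'
        by_cases he : s' = s
        · subst he; rw [PySem.Dict.getD_insert_self]
        · rw [PySem.Dict.getD_insert_of_ne _ _ _ he, hrem s', hslugs,
            List.count_append]
          have h1 : List.count s' [s] = 0 := List.count_eq_zero.mpr (by simp [he])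
          rw [h1]
          simp)
      (by rw [hitems])
      (by simpa using hnd)
    rw [hrec]
    simp [List.append_assoc]

-- ===== VERDICT (by name: the statement is the Claim_ definition above) =====
theorem replace_duplicate_slugs_spec : Claim_equal_replace_duplicate_slugs := by
  intro l _
  show replace_duplicate_slugs l = replace_duplicate_slugs_alt l
  unfold replace_duplicate_slugs replace_duplicate_slugs_alt
  have hnd : (((PySem.Dict.ofList l).items).map (·.1)).Nodup := by
    have h := PySem.Dict.nodup_keys_ofList (ps := l)
    simpa [PySem.Dict.keys] using h
  have hA := rdsA_loop ((PySem.Dict.ofList l).items) [] [] PySem.Dict.empty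
    PySem.Set.empty (PySem.Dict.ofList l)
    (by simp)
    (by simpa using hnd)
    (by intro s; simp [PySem.Set.empty, PySem.Set.contains])
    (by intro s; simp [PySem.Dict.get?_empty])
  have hrem : ∀ s, ((PySem.Dict.ofList l).items.foldl
      (fun r p => r.insert p.2 (r.getD p.2 0 + 1)) PySem.Dict.empty).getD s 0
      = ((((PySem.Dict.ofList l).items).map (·.2)).count s : Int) := by
    intro s
    rw [← List.foldl_map (f := fun p : String × String => p.2)
        (g := fun (r : PySem.Dict String Int) x => r.insert x (r.getD x 0 + 1))]
    rw [PySem.Dict.getD_foldl_insert_add_one]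
    simp [PySem.Dict.getD_empty]
  have hB := rdsB_loop ((PySem.Dict.ofList l).items) [] _ (PySem.Dict.ofList l)
    hrem
    (by simp [rdsF])
    (by simpa using hnd)
  simp only [List.append_nil] at hB
  simp only [List.nil_append] at hA
  rw [hA, hB]
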